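-- pv_equiv track=rewrite | github.com/jmount1992/serial_protocol_python | src/serial_protocol/utils.py | is_0x_format
-- ===== SOURCE A (Python) =====
-- def is_0x_format(hex_string: str) -> bool:
--     """
--     Determines whether a given hex string uses the '0x' prefix format.
--
--     Args:
--         hex_string (str): A space-separated string of hexadecimal values.
--
--     Returns:
--         bool: True if all tokens use the '0x' prefix, False if all are plain hex.
--
--     Raises:
--         ValueError: If the string contains a mix of formats.
--
--     Example:
--         >>> is_0x_format("0x01 0x02 0x03")
--         True
--         >>> is_0x_format("01 02 03")
--         False
--         >>> is_0x_format("0x01 02")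
--         ValueError
--     """
--     tokens = hex_string.split()
--     has_0x = [token.startswith("0x") for token in tokens]
--     if all(has_0x):
--         return True
--     if any(has_0x):
--         raise ValueError("The hex string contains mixed '0x' and plain hex formats.")
--     return False
-- ===== SOURCE B (Python) =====
-- def is_0x_format(hex_string: str) -> bool:
--     tokens = hex_string.split()
--     if not tokens:
--         return True
--     expected = tokens[0].startswith("0x")
--     for token in tokens[1:]:
--         if token.startswith("0x") != expected:
--             raise ValueError("The hex string contains mixed '0x' and plain hex formats.")
--     return expected
-- ===== Notes on version B (the rewrite author's own statement) =====
-- stated objective: alternative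
-- what changed: Instead of building a list of booleans and aggregating with all()/any(), B takes the first token's prefix status as the reference and validates the remaining tokens against it in one pass, raising on the first mismatch.
-- outside the precondition, e.g. on is_0x_format('0x01 02'): A raises ValueError, B raises ValueError
import Mathlib
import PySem

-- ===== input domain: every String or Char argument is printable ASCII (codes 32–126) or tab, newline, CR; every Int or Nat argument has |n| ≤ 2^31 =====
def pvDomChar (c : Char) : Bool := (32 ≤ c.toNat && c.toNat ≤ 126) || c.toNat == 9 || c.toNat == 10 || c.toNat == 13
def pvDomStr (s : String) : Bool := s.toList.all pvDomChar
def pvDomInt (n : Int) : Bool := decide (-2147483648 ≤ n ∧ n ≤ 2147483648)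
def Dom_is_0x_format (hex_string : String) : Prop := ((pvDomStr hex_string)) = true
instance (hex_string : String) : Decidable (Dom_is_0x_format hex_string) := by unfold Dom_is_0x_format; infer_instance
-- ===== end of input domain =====

-- B validates all tokens against the first token's prefix status in one pass instead of
-- aggregating a boolean list with all()/any(); same cost, different decomposition.
-- Both A and B raise ValueError on mixed-format input; Pre_ excludes exactly those inputs.

-- ===== PORT A =====
def is_0x_format (hex_string : String) : Bool :=
  let tokens := PySem.Str.split₀ hex_string
  let has_0x := tokens.map (fun token => PySem.Str.startswith token "0x")
  if has_0x.all id then true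
  else if has_0x.any id then false   -- Python raises ValueError here; excluded by Pre_
  else false

-- ===== PORT B =====
-- loop over the remaining tokens; `none` models the ValueError raise (excluded by Pre_)
def is0xAltGo (expected : Bool) : List String → Option Bool
  | [] => some expected
  | token :: rest =>
      if PySem.Str.startswith token "0x" ≠ expected then none
      else is0xAltGo expected rest

def is_0x_format_alt (hex_string : String) : Bool :=
  match PySem.Str.split₀ hex_string with
  | [] => true
  | t :: rest => (is0xAltGo (PySem.Str.startswith t "0x") rest).getD false

-- ===== PRECONDITION & SPEC =====
-- Pre_ excludes exactly the mixed-format strings, on which Python A (and B) raise ValueError.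
def Pre_is_0x_format (hex_string : String) : Prop :=
  let has_0x := (PySem.Str.split₀ hex_string).map (fun token => PySem.Str.startswith token "0x")
  has_0x.all id = true ∨ has_0x.any id = false
instance (hex_string : String) : Decidable (Pre_is_0x_format hex_string) := by unfold Pre_is_0x_format; infer_instance

def pvWitness_is_0x_format : String := "0x01 0x02"

def Spec_is_0x_format (hex_string : String) (out : Bool) : Prop := out = is_0x_format_alt hex_string
instance (hex_string : String) (out : Bool) : Decidable (Spec_is_0x_format hex_string out) := by unfold Spec_is_0x_format; infer_instance

-- ===== CLAIM (what is proved, stated in full; the proofs are below) =====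
def Claim_equal_is_0x_format : Prop := ∀ (hex_string : String), Dom_is_0x_format hex_string → Pre_is_0x_format hex_string → Spec_is_0x_format hex_string (is_0x_format hex_string)

-- ===== LEMMAS AND PROOFS =====
-- stated in the simp-normal (Chars) form of PySem.Str.startswith
theorem is0xAltGo_const (e : Bool) (ts : List String)
    (h : ∀ t ∈ ts, PySem.Chars.startswith t.toList ['0', 'x'] = e) :
    is0xAltGo e ts = some e := by
  induction ts with
  | nil => rfl
  | cons t ts ih =>
      have ht := h t (List.mem_cons_self ..)
      simp [is0xAltGo, ht, ih (fun x hx => h x (List.mem_cons_of_mem _ hx))]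

-- ===== VERDICT (by name: the statement is the Claim_ definition above) =====
theorem is_0x_format_spec : Claim_equal_is_0x_format := by
  intro s _ hpre
  unfold Spec_is_0x_format is_0x_format is_0x_format_alt
  unfold Pre_is_0x_format at hpre
  simp only [List.all_eq_true, List.any_eq_false, List.mem_map, id,
    forall_exists_index, and_imp, forall_apply_eq_imp_iff₂,
    PySem.Str.startswith_eq] at hpre ⊢
  cases htok : PySem.Str.split₀ s with
  | nil => simp
  | cons t rest =>
      rw [htok] at hpre
      by_cases ht : PySem.Chars.startswith t.toList ['0', 'x'] = true
      · have hrest : ∀ x ∈ rest, PySem.Chars.startswith x.toList ['0', 'x'] = true := by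
          rcases hpre with h | h
          · intro x hx; exact h x (List.mem_cons_of_mem _ hx)
          · exact absurd ht (h t (List.mem_cons_self ..))
        have hgo : is0xAltGo true rest = some true := is0xAltGo_const true rest hrest
        simp [ht, hgo]
        exact hrest
      · have ht' : PySem.Chars.startswith t.toList ['0', 'x'] = false := by
          simpa using ht
        have hrest : ∀ x ∈ rest, PySem.Chars.startswith x.toList ['0', 'x'] = false := by
          rcases hpre with h | h
          · exact absurd (h t (List.mem_cons_self ..)) ht
          · intro x hx
            simpa using h x (List.mem_cons_of_mem _ hx)
        have hgo : is0xAltGo false rest = some false := is0xAltGo_const false rest hrest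
        simp [ht', hgo]
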